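-- pv_equiv track=rewrite | github.com/madlee/madlee | madlee/misc.py | data_bin
-- ===== SOURCE A (Python) =====
-- def data_bin(data, factor, key=0, i=0, j=None, fillgap=False):
--     if j == None:
--         j = len(data)
--     if i < j:
--         ki, kj = data[i][key] // factor,  data[j-1][key] // factor
--         if ki == kj:
--             return [ data[i:j] ]
--         else:
--             result = []
--             mid = (i+j) // 2
--
--             result_l = data_bin(data, factor, key, i, mid)
--             result_r = data_bin(data, factor, key, mid, j)
--             if result_l and result_r:
--                 vl, vr = result_l[-1], result_r[0]
--                 if vl[0][key] // factor == vr[0][key] // factor: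
--                     result = result_l[:-1] + [vl+vr] + result_r[1:]
--                 else:
--                     result = result_l + result_r
--             else:
--                 result = result_l + result_r
--
--         if fillgap and result:
--             result2 = [result[0]]
--             next = 1
--             for next in range(1, len(result)):
--                 next_k = result[next][0][key] // factor
--                 result2 += [[]] * int(next_k - ki - 1)
--                 result2.append(result[next])
--                 ki = next_k
--             result = result2
--
--         return result
--     else:
--         return []
-- ===== SOURCE B (Python) =====
-- def data_bin(data, factor, key=0, i=0, j=None, fillgap=False):
--     if j is None:
--         j = len(data)
--     chunk = data[i:j]
--     n = len(chunk)
--     groups = []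
--     p = 0
--     while p < n:
--         b = chunk[p][key] // factor
--         q = p + 1
--         while q < n and chunk[q][key] // factor == b:
--             q += 1
--         groups.append(chunk[p:q])
--         p = q
--     if fillgap and len(groups) > 1:
--         out = [groups[0]]
--         prev = groups[0][0][key] // factor
--         for g in groups[1:]:
--             b = g[0][key] // factor
--             out += [[]] * (b - prev - 1)
--             out.append(g)
--             prev = b
--         groups = out
--     return groups
-- ===== Notes on version B (the rewrite author's own statement) =====
-- stated objective: alternative
-- what changed: Replaced A's divide-and-conquer recursion (split at the midpoint, recurse, merge adjacent groups whose bins coincide) by a single linear two-pointer scan that groups consecutive rows with equal key//factor bin; on nonempty ranges Pre_ requires factor != 0, in-range bounds and keys, and that equal bins in the slice are contiguous (true of the documented sorted input), outside which A raises or its merge-by-endpoints result is an artefact of its recursion.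
-- outside the precondition, e.g. on data_bin([[1], [2]], 1, 0, 0, -1, False): A returns [], B returns [[[1]]]; on data_bin([[1]], 0, 0, 0, None, False): A raises ZeroDivisionError, B raises ZeroDivisionError
import Mathlib
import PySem

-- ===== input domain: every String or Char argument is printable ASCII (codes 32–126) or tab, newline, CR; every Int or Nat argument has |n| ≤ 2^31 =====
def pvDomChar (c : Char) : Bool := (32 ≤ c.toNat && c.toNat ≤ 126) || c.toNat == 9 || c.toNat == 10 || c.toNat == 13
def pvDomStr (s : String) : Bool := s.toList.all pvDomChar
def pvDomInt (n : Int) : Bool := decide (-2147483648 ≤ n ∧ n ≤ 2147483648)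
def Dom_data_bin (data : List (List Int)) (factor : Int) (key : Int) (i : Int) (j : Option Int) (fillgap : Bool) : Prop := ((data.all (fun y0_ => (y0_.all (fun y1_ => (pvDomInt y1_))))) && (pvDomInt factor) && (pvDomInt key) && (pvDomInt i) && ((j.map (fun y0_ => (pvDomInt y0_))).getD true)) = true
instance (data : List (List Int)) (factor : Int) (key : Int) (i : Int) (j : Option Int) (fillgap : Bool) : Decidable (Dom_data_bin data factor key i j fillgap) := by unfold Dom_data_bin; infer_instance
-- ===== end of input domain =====

-- B replaces A's midpoint divide-and-conquer (recurse on both halves, merge the boundary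
-- groups when their bins coincide) by one linear two-pointer scan over the slice that emits
-- each maximal run of equal key//factor bins; objective: alternative (a genuinely different
-- single-pass algorithm).
-- Pre_ states the function's contract: factor ≠ 0, the slice bounds are in range and the
-- selected slice is sorted by bin (outside sortedness A's merge-by-endpoints value is an
-- artefact of its recursion; on negative/out-of-range bounds or a bad key A raises or the
-- two slice readings legitimately differ).

-- ===== PORT A =====
-- bin of a row: row[key] // factor
def pvBin (factor key : Int) (row : List Int) : Int :=
  PySem.Int.floordiv (PySem.List.pyGetD row key 0) factor

-- the recursive calls data_bin(data, factor, key, i, mid) / (…, mid, j): j an int,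
-- fillgap the default False (so the fillgap block of the Python body is skipped here)
def data_bin_go (data : List (List Int)) (factor key : Int) (i j : Int) : List (List (List Int)) :=
  if hij : i < j then
    if hk : pvBin factor key (PySem.List.pyGetD data i []) =
            pvBin factor key (PySem.List.pyGetD data (j - 1) []) then
      [PySem.List.slice data (some i) (some j)]
    else
      let result_l := data_bin_go data factor key i (PySem.Int.floordiv (i + j) 2)
      let result_r := data_bin_go data factor key (PySem.Int.floordiv (i + j) 2) j
      if result_l ≠ [] ∧ result_r ≠ [] then
        -- vl := result_l[-1], vr := result_r[0], inlined
        if pvBin factor key (PySem.List.pyGetD (PySem.List.pyGetD result_l (-1) []) 0 []) =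
           pvBin factor key (PySem.List.pyGetD (PySem.List.pyGetD result_r 0 []) 0 []) then
          PySem.List.slice result_l none (some (-1)) ++
            [PySem.List.pyGetD result_l (-1) [] ++ PySem.List.pyGetD result_r 0 []] ++
            PySem.List.slice result_r (some 1) none
        else result_l ++ result_r
      else result_l ++ result_r
  else []
termination_by (j - i).toNat
decreasing_by
  · have h2 : i + 2 ≤ j := by
      rcases Int.lt_or_le j (i + 2) with h | h
      · exfalso; have hj : j - 1 = i := by omega
        rw [hj] at hk; exact hk rfl
      · exact h
    have hm := PySem.Int.floordiv_eq_ediv_of_pos (a := i + j) (b := 2) (by norm_num)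
    rw [hm]; omega
  · have h2 : i + 2 ≤ j := by
      rcases Int.lt_or_le j (i + 2) with h | h
      · exfalso; have hj : j - 1 = i := by omega
        rw [hj] at hk; exact hk rfl
      · exact h
    have hm := PySem.Int.floordiv_eq_ediv_of_pos (a := i + j) (b := 2) (by norm_num)
    rw [hm]; omega

def data_bin (data : List (List Int)) (factor : Int) (key : Int) (i : Int) (j : Option Int) (fillgap : Bool) : List (List (List Int)) :=
  let jv := j.getD (data.length : Int)
  if i < jv then
    let ki := pvBin factor key (PySem.List.pyGetD data i [])
    if ki = pvBin factor key (PySem.List.pyGetD data (jv - 1) []) then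
      [PySem.List.slice data (some i) (some jv)]
    else
      let result_l := data_bin_go data factor key i (PySem.Int.floordiv (i + jv) 2)
      let result_r := data_bin_go data factor key (PySem.Int.floordiv (i + jv) 2) jv
      let result :=
        if result_l ≠ [] ∧ result_r ≠ [] then
          if pvBin factor key (PySem.List.pyGetD (PySem.List.pyGetD result_l (-1) []) 0 []) =
             pvBin factor key (PySem.List.pyGetD (PySem.List.pyGetD result_r 0 []) 0 []) then
            PySem.List.slice result_l none (some (-1)) ++
              [PySem.List.pyGetD result_l (-1) [] ++ PySem.List.pyGetD result_r 0 []] ++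
              PySem.List.slice result_r (some 1) none
          else result_l ++ result_r
        else result_l ++ result_r
      if fillgap ∧ result ≠ [] then
        ((PySem.List.pyRange 1 (result.length : Int) 1).foldl
          (fun (s : List (List (List Int)) × Int) next =>
            (s.1 ++ List.replicate (pvBin factor key (PySem.List.pyGetD (PySem.List.pyGetD result next []) 0 []) - s.2 - 1).toNat []
                 ++ [PySem.List.pyGetD result next []],
             pvBin factor key (PySem.List.pyGetD (PySem.List.pyGetD result next []) 0 [])))
          ([PySem.List.pyGetD result 0 []], ki)).1
      else result
  else []

-- ===== PORT B =====
-- the outer while-loop of B: emit the maximal run starting at the cursor (the inner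
-- while-scan is the takeWhile, the cursor jump p := q is the dropWhile), repeat
def pvRuns (factor key : Int) : List (List Int) → List (List (List Int))
  | [] => []
  | r :: rest =>
      (r :: rest.takeWhile (fun x => pvBin factor key x == pvBin factor key r)) ::
        pvRuns factor key (rest.dropWhile (fun x => pvBin factor key x == pvBin factor key r))
termination_by s => s.length
decreasing_by
  simp only [List.length_cons]
  exact Nat.lt_succ_of_le (List.length_dropWhile_le _ _)

-- B's gap-filling loop over groups[1:]
def pvFill (factor key : Int) (groups : List (List (List Int))) : List (List (List Int)) :=
  match groups with
  | [] => []
  | g0 :: rest =>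
      (rest.foldl
        (fun (s : List (List (List Int)) × Int) g =>
          (s.1 ++ List.replicate (pvBin factor key (PySem.List.pyGetD g 0 []) - s.2 - 1).toNat []
               ++ [g],
           pvBin factor key (PySem.List.pyGetD g 0 [])))
        ([g0], pvBin factor key (PySem.List.pyGetD g0 0 []))).1

def data_bin_alt (data : List (List Int)) (factor : Int) (key : Int) (i : Int) (j : Option Int) (fillgap : Bool) : List (List (List Int)) :=
  let jv := j.getD (data.length : Int)
  let groups := pvRuns factor key (PySem.List.slice data (some i) (some jv))
  if fillgap && decide (1 < groups.length) then pvFill factor key groups else groups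

-- ===== PRECONDITION & SPEC =====
-- equal bins occur only contiguously: if two positions carry the same key//factor bin,
-- every position between them does too (any bin-sorted list satisfies this)
def pvCoherent (f k : Int) (l : List (List Int)) : Prop :=
  ((List.range l.length).all fun p => (List.range l.length).all fun q =>
    (List.range l.length).all fun r =>
      !(p ≤ q && q ≤ r && pvBin f k (l.getD p []) == pvBin f k (l.getD r [])) ||
        (pvBin f k (l.getD q []) == pvBin f k (l.getD p []))) = true
-- For a nonempty index range i..j, Pre_ excludes: factor = 0 and a key out of range for a
-- row of the slice (A raises there); a negative i or a j beyond len(data) (A raises, or its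
-- index walk reads different rows than the slice data[i:j], a corner where both readings
-- are defensible); and a slice in which two equal key//factor bins are separated by a
-- different bin — the function's documented input is data sorted by bin (which makes equal
-- bins contiguous), and on such scattered-bin data A's merge-by-endpoints value is an
-- accident of its recursion. For an empty range (i ≥ j) A returns [] without reading data,
-- and Pre_ only requires that the slice data[i:j] is empty too (it is unless j is negative
-- with i in front of it, where Python's two readings of the pair legitimately differ).
def Pre_data_bin (data : List (List Int)) (factor : Int) (key : Int) (i : Int) (j : Option Int) (fillgap : Bool) : Prop :=
  (i < j.getD (data.length : Int) →
    factor ≠ 0 ∧ 0 ≤ i ∧ j.getD (data.length : Int) ≤ (data.length : Int) ∧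
    (∀ row ∈ PySem.List.slice data (some i) (some (j.getD (data.length : Int))),
        PySem.Raise.InRange row.length key) ∧
    pvCoherent factor key (PySem.List.slice data (some i) (some (j.getD (data.length : Int))))) ∧
  (¬ i < j.getD (data.length : Int) →
    PySem.List.slice data (some i) (some (j.getD (data.length : Int))) = [])
instance (data : List (List Int)) (factor : Int) (key : Int) (i : Int) (j : Option Int) (fillgap : Bool) : Decidable (Pre_data_bin data factor key i j fillgap) := by
  unfold Pre_data_bin pvCoherent; infer_instance
def pvWitness_data_bin : List (List Int) × Int × Int × Int × Option Int × Bool :=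
  ([[0], [3], [7]], 3, 0, 0, none, true)
def Spec_data_bin (data : List (List Int)) (factor : Int) (key : Int) (i : Int) (j : Option Int) (fillgap : Bool) (out : List (List (List Int))) : Prop := out = data_bin_alt data factor key i j fillgap
instance (data : List (List Int)) (factor : Int) (key : Int) (i : Int) (j : Option Int) (fillgap : Bool) (out : List (List (List Int))) : Decidable (Spec_data_bin data factor key i j fillgap out) := by unfold Spec_data_bin; infer_instance

-- ===== CLAIM (what is proved, stated in full; the proofs are below) =====
def Claim_equal_data_bin : Prop := ∀ (data : List (List Int)) (factor : Int) (key : Int) (i : Int) (j : Option Int) (fillgap : Bool), Dom_data_bin data factor key i j fillgap → Pre_data_bin data factor key i j fillgap → Spec_data_bin data factor key i j fillgap (data_bin data factor key i j fillgap)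

-- ===== LEMMAS AND PROOFS =====

theorem pvRuns_nil (f k : Int) : pvRuns f k [] = [] := by rw [pvRuns]
theorem pvRuns_cons (f k : Int) (r : List Int) (rest : List (List Int)) :
    pvRuns f k (r :: rest) =
      (r :: rest.takeWhile (fun x => pvBin f k x == pvBin f k r)) ::
        pvRuns f k (rest.dropWhile (fun x => pvBin f k x == pvBin f k r)) := by
  rw [pvRuns]
theorem pvRuns_eq_nil_iff (f k : Int) (s : List (List Int)) : pvRuns f k s = [] ↔ s = [] := by
  cases s with
  | nil => simp [pvRuns_nil]
  | cons r rest => simp [pvRuns_cons]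
theorem getLastD_irrel {α : Type} (l : List α) (h : l ≠ []) (d1 d2 : α) :
    l.getLastD d1 = l.getLastD d2 := by
  cases l with
  | nil => exact absurd rfl h
  | cons a t =>
    simp only [List.getLastD_eq_getLast?]
    obtain ⟨y, hy⟩ := Option.isSome_iff_exists.mp (by simp [List.getLast?_isSome] : (a :: t).getLast?.isSome = true)
    rw [hy]
    rfl
theorem suffix_getLastD {α : Type} {l1 l2 : List α} (h : l2 <:+ l1) (hne : l2 ≠ []) (d : α) :
    l1.getLastD d = l2.getLastD d := by
  obtain ⟨t, rfl⟩ := h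
  simp [List.getLastD_eq_getLast?, List.getLast?_append_of_ne_nil t hne]

theorem pvRuns_single (f k : Int) (r : List Int) (rest : List (List Int))
    (h : ∀ x ∈ rest, pvBin f k x = pvBin f k r) : pvRuns f k (r :: rest) = [r :: rest] := by
  rw [pvRuns_cons,
      List.takeWhile_eq_self_iff.mpr (by intro x hx; simp [h x hx]),
      List.dropWhile_eq_nil_iff.mpr (by intro x hx; simp [h x hx]), pvRuns_nil]

theorem pvRuns_last_bin (f k : Int) :
    ∀ (n : Nat) (s : List (List Int)), s.length = n → s ≠ [] →
      pvBin f k (((pvRuns f k s).getLastD []).headD []) = pvBin f k (s.getLastD []) := by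
  intro n
  induction n using Nat.strong_induction_on with
  | _ n ih =>
    intro s hn hs
    cases s with
    | nil => exact absurd rfl hs
    | cons r rest =>
      rw [pvRuns_cons]
      by_cases hd : rest.dropWhile (fun x => pvBin f k x == pvBin f k r) = []
      · have hall := List.dropWhile_eq_nil_iff.mp hd
        rw [hd, pvRuns_nil,
            List.takeWhile_eq_self_iff.mpr hall]
        cases rest with
        | nil => rfl
        | cons b u =>
          have hmem := hall ((b :: u).getLastD []) (List.mem_of_getLast? rfl)
          simp only [beq_iff_eq] at hmem
          show pvBin f k r = pvBin f k ((r :: b :: u).getLastD [])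
          rw [List.getLastD_cons, getLastD_irrel (b :: u) (by simp) r [], hmem]
      · have hlen : (rest.dropWhile (fun x => pvBin f k x == pvBin f k r)).length < n := by
          rw [← hn]; simp only [List.length_cons]
          exact Nat.lt_succ_of_le (List.length_dropWhile_le _ _)
        have hrne : pvRuns f k (rest.dropWhile (fun x => pvBin f k x == pvBin f k r)) ≠ [] := by
          rw [Ne, pvRuns_eq_nil_iff]; exact hd
        have hrest : rest ≠ [] := by rintro rfl; simp at hd
        rw [List.getLastD_cons, getLastD_irrel _ hrne _ [],
            ih _ hlen _ rfl hd, List.getLastD_cons, getLastD_irrel _ hrest r [],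
            suffix_getLastD (List.dropWhile_suffix _) hd]

theorem pvRuns_append (f k : Int) (s2 : List (List Int)) (h2 : s2 ≠ []) :
    ∀ (n : Nat) (s1 : List (List Int)), s1.length = n → s1 ≠ [] →
    pvRuns f k (s1 ++ s2) =
      if pvBin f k (s1.getLastD []) = pvBin f k (s2.headD [])
      then (pvRuns f k s1).dropLast ++
             (((pvRuns f k s1).getLastD []) ++ ((pvRuns f k s2).headD [])) :: (pvRuns f k s2).tail
      else pvRuns f k s1 ++ pvRuns f k s2 := by
  intro n
  induction n using Nat.strong_induction_on with
  | _ n ih =>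
    intro s1 hn h1
    cases s1 with
    | nil => exact absurd rfl h1
    | cons r rest =>
      by_cases hall : rest.dropWhile (fun x => pvBin f k x == pvBin f k r) = []
      · have hallp := List.dropWhile_eq_nil_iff.mp hall
        have htw : rest.takeWhile (fun x => pvBin f k x == pvBin f k r) = rest :=
          List.takeWhile_eq_self_iff.mpr hallp
        have hruns1 : pvRuns f k (r :: rest) = [r :: rest] := by
          rw [pvRuns_cons, htw, hall, pvRuns_nil]
        have hlast1 : pvBin f k ((r :: rest).getLastD []) = pvBin f k r := by
          cases rest with
          | nil => rfl
          | cons b u =>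
            have hm := hallp _ (List.mem_of_getLast? rfl)
            simp only [beq_iff_eq] at hm
            rw [List.getLastD_cons, getLastD_irrel (b :: u) (by simp) r []]
            exact hm
        rw [List.cons_append, pvRuns_cons, List.takeWhile_append, List.dropWhile_append]
        rw [if_pos (by rw [htw]), if_pos (by rw [hall]; rfl)]
        rw [hruns1, hlast1]
        cases s2 with
        | nil => exact absurd rfl h2
        | cons h0 t0 =>
          by_cases hh : pvBin f k h0 = pvBin f k r
          · have hph : (pvBin f k h0 == pvBin f k r) = true := by simp [hh]
            have hfun : (fun x => pvBin f k x == pvBin f k h0) =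
                (fun x => pvBin f k x == pvBin f k r) := by funext x; simp [hh]
            simp only [List.takeWhile_cons, List.dropWhile_cons, hph, if_true]
            rw [pvRuns_cons f k h0 t0, hfun]
            rw [if_pos (by simpa using hh.symm)]
            simp
          · have hph : (pvBin f k h0 == pvBin f k r) = false := by simp [hh]
            simp only [List.takeWhile_cons, List.dropWhile_cons, hph, if_false, Bool.false_eq_true]
            rw [if_neg (by simpa using fun e => hh e.symm)]
            simp
      · have hrestne : rest ≠ [] := by rintro rfl; simp at hall
        have htwlen : ¬ ((rest.takeWhile (fun x => pvBin f k x == pvBin f k r)).length = rest.length) := by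
          intro hlen
          exact hall (List.dropWhile_eq_nil_iff.mpr
            (List.takeWhile_eq_self_iff.mp ((List.takeWhile_prefix _).eq_of_length hlen)))
        have hrne : pvRuns f k (rest.dropWhile (fun x => pvBin f k x == pvBin f k r)) ≠ [] := by
          rw [Ne, pvRuns_eq_nil_iff]; exact hall
        have hlen2 : (rest.dropWhile (fun x => pvBin f k x == pvBin f k r)).length < n := by
          rw [← hn]; simp only [List.length_cons]
          exact Nat.lt_succ_of_le (List.length_dropWhile_le _ _)
        rw [List.cons_append, pvRuns_cons, List.takeWhile_append, List.dropWhile_append]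
        rw [if_neg htwlen, if_neg (by simp [hall])]
        rw [ih _ hlen2 _ rfl hall]
        rw [pvRuns_cons]
        have hlasteq : (r :: rest).getLastD ([] : List Int) =
            (rest.dropWhile (fun x => pvBin f k x == pvBin f k r)).getLastD [] := by
          rw [List.getLastD_cons, getLastD_irrel rest hrestne r [],
              suffix_getLastD (List.dropWhile_suffix _) hall]
        rw [hlasteq]
        by_cases hcond : pvBin f k ((rest.dropWhile (fun x => pvBin f k x == pvBin f k r)).getLastD []) =
            pvBin f k (s2.headD [])
        · rw [if_pos hcond, if_pos hcond]
          rw [List.dropLast_cons_of_ne_nil hrne, List.getLastD_cons, getLastD_irrel _ hrne _ []]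
          simp
          rw [← List.getLastD_eq_getLast?, ← List.getLastD_eq_getLast?]
          exact getLastD_irrel _ hrne _ _
        · rw [if_neg hcond, if_neg hcond]
          simp

theorem slice_split (data : List (List Int)) (a m b : Int) (ha : 0 ≤ a) (ham : a ≤ m)
    (hmb : m ≤ b) :
    PySem.List.slice data (some a) (some b) =
      PySem.List.slice data (some a) (some m) ++ PySem.List.slice data (some m) (some b) := by
  rw [PySem.List.slice_toNat _ ha (by omega), PySem.List.slice_toNat _ ha (by omega),
      PySem.List.slice_toNat _ (by omega) (by omega)]
  have h1 : b.toNat - a.toNat = (m.toNat - a.toNat) + (b.toNat - m.toNat) := by omega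
  rw [h1, List.take_add]
  rw [List.drop_drop]
  have h2 : a.toNat + (m.toNat - a.toNat) = m.toNat := by omega
  rw [h2]

theorem slice_empty_of_le (data : List (List Int)) (a b : Int) (hb : 0 ≤ b) (hab : b ≤ a) :
    PySem.List.slice data (some a) (some b) = [] := by
  rw [PySem.List.slice_toNat _ (by omega) hb]
  have : b.toNat - a.toNat = 0 := by omega
  simp [this]

theorem slice_ne_nil (data : List (List Int)) (a b : Int) (ha : 0 ≤ a) (hab : a < b)
    (hb : b ≤ (data.length : Int)) : PySem.List.slice data (some a) (some b) ≠ [] := by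
  rw [PySem.List.slice_toNat _ ha (by omega), Ne, ← List.length_eq_zero_iff]
  simp only [List.length_take, List.length_drop]
  omega

theorem slice_headD (data : List (List Int)) (a b : Int) (ha : 0 ≤ a) (hab : a < b)
    (hb : b ≤ (data.length : Int)) :
    (PySem.List.slice data (some a) (some b)).headD [] = PySem.List.pyGetD data a [] := by
  rw [PySem.List.slice_toNat _ ha (by omega),
      PySem.List.pyGetD_eq_getElem _ _ ha (by omega)]
  rw [List.headD_eq_head?, List.head?_eq_getElem?, List.getElem?_take, List.getElem?_drop]
  have h1 : 0 < b.toNat - a.toNat := by omega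
  simp only [if_pos h1]
  rw [List.getElem?_eq_getElem (by omega)]
  simp

theorem slice_getLastD (data : List (List Int)) (a b : Int) (ha : 0 ≤ a) (hab : a < b)
    (hb : b ≤ (data.length : Int)) :
    (PySem.List.slice data (some a) (some b)).getLastD [] = PySem.List.pyGetD data (b - 1) [] := by
  rw [PySem.List.slice_toNat _ ha (by omega),
      PySem.List.pyGetD_eq_getElem _ _ (by omega) (by omega)]
  rw [List.getLastD_eq_getLast?, List.getLast?_eq_getElem?]
  simp only [List.length_take, List.length_drop]
  have hmin : min (b.toNat - a.toNat) (data.length - a.toNat) = b.toNat - a.toNat := by omega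
  rw [hmin, List.getElem?_take, List.getElem?_drop]
  have h1 : b.toNat - a.toNat - 1 < b.toNat - a.toNat := by omega
  simp only [if_pos h1]
  rw [List.getElem?_eq_getElem (by omega)]
  simp only [Option.getD_some]
  congr 1
  omega

theorem getLast_eq_getLastD' {α : Type} (l : List α) (h : l ≠ []) (d : α) :
    l.getLast h = l.getLastD d := by
  cases l with
  | nil => exact absurd rfl h
  | cons a t => rw [List.getLast_eq_getLastD, List.getLastD_cons]

theorem getD_zero_eq_headD {α : Type} (l : List α) (d : α) : l.getD 0 d = l.headD d := by
  rw [List.getD_eq_getElem?_getD, List.headD_eq_head?, List.head?_eq_getElem?]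

theorem pvRuns_head_head (f k : Int) (r : List Int) (rest : List (List Int)) :
    ((pvRuns f k (r :: rest)).headD []).headD [] = r := by
  rw [pvRuns_cons]; rfl

theorem pvCoherent_iff (f k : Int) (l : List (List Int)) : pvCoherent f k l ↔
    ∀ p < l.length, ∀ q < l.length, ∀ r < l.length, p ≤ q → q ≤ r →
      pvBin f k (l.getD p []) = pvBin f k (l.getD r []) →
      pvBin f k (l.getD q []) = pvBin f k (l.getD p []) := by
  unfold pvCoherent
  simp [List.all_eq_true, List.mem_range, Decidable.imp_iff_not_or, or_assoc]

theorem coh_append_left (f k : Int) (l1 l2 : List (List Int)) (h : pvCoherent f k (l1 ++ l2)) :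
    pvCoherent f k l1 := by
  rw [pvCoherent_iff] at h ⊢
  intro p hp q hq r hr hpq hqr heq
  have hg : ∀ m, m < l1.length → (l1 ++ l2).getD m [] = l1.getD m [] := by
    intro m hm
    rw [List.getD_eq_getElem?_getD, List.getD_eq_getElem?_getD, List.getElem?_append_left hm]
  have := h p (by simp; omega) q (by simp; omega) r (by simp; omega) hpq hqr
  rw [hg p hp, hg q hq, hg r hr] at this
  exact this heq

theorem coh_append_right (f k : Int) (l1 l2 : List (List Int)) (h : pvCoherent f k (l1 ++ l2)) :
    pvCoherent f k l2 := by
  rw [pvCoherent_iff] at h ⊢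
  intro p hp q hq r hr hpq hqr heq
  have hg : ∀ m, m < l2.length → (l1 ++ l2).getD (l1.length + m) [] = l2.getD m [] := by
    intro m hm
    rw [List.getD_eq_getElem?_getD, List.getD_eq_getElem?_getD, List.getElem?_append_right (by omega)]
    congr 2
    omega
  have := h (l1.length + p) (by simp; omega) (l1.length + q) (by simp; omega)
    (l1.length + r) (by simp; omega) (by omega) (by omega)
  rw [hg p hp, hg q hq, hg r hr] at this
  exact this heq

theorem coh_all_eq (f k : Int) (c : List Int) (cs : List (List Int))
    (h : pvCoherent f k (c :: cs))
    (hlast : pvBin f k ((c :: cs).getLastD []) = pvBin f k c) :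
    ∀ x ∈ cs, pvBin f k x = pvBin f k c := by
  rw [pvCoherent_iff] at h
  intro x hx
  obtain ⟨q, hq, rfl⟩ := List.mem_iff_getElem.mp hx
  have hgl : (c :: cs).getD cs.length ([] : List Int) = (c :: cs).getLastD [] := by
    rw [List.getD_eq_getElem?_getD, List.getLastD_eq_getLast?, List.getLast?_eq_getElem?]
    simp
  have hq1 : (c :: cs).getD (q + 1) ([] : List Int) = cs[q] := by
    rw [List.getD_eq_getElem?_getD]
    simp [List.getElem?_eq_getElem (by simp; omega : q + 1 < (c :: cs).length)]
  have h0 : (c :: cs).getD 0 ([] : List Int) = c := rfl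
  have := h 0 (by simp) (q + 1) (by simp; omega) cs.length (by simp) (by omega) (by omega)
  rw [h0, hgl, hq1, hlast] at this
  exact this rfl

-- the divide-and-conquer recursion computes the consecutive-run decomposition of the slice
theorem go_eq (data : List (List Int)) (f k : Int) :
    ∀ (n : Nat) (a b : Int), (b - a).toNat = n → 0 ≤ a → a ≤ b → b ≤ (data.length : Int) →
      pvCoherent f k (PySem.List.slice data (some a) (some b)) →
      data_bin_go data f k a b = pvRuns f k (PySem.List.slice data (some a) (some b)) := by
  intro n
  induction n using Nat.strong_induction_on with
  | _ n ih =>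
    intro a b hn ha hab hb hp
    rw [data_bin_go]
    by_cases hij : a < b
    · rw [dif_pos hij]
      have hne := slice_ne_nil data a b ha hij hb
      have hhead := slice_headD data a b ha hij hb
      have hlastd := slice_getLastD data a b ha hij hb
      by_cases hk : pvBin f k (PySem.List.pyGetD data a []) =
          pvBin f k (PySem.List.pyGetD data (b - 1) [])
      · rw [dif_pos hk]
        obtain ⟨c, cs, hcs⟩ : ∃ c cs, PySem.List.slice data (some a) (some b) = c :: cs := by
          cases h : PySem.List.slice data (some a) (some b) with
          | nil => exact absurd h hne
          | cons c cs => exact ⟨c, cs, rfl⟩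
        rw [hcs, pvRuns_single]
        have hle : pvBin f k ((c :: cs).getLastD []) = pvBin f k c := by
          have h1 : (c :: cs).getLastD ([] : List Int) =
              PySem.List.pyGetD data (b - 1) [] := by rw [← hcs, hlastd]
          have h2 : (c :: cs).headD ([] : List Int) = PySem.List.pyGetD data a [] := by
            rw [← hcs, hhead]
          rw [h1, ← hk, ← h2]
          rfl
        exact coh_all_eq f k c cs (hcs ▸ hp) hle
      · rw [dif_neg hk]
        have hab2 : a + 2 ≤ b := by
          rcases Int.lt_or_le b (a + 2) with h | h
          · exfalso; have hb1 : b - 1 = a := by omega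
            rw [hb1] at hk; exact hk rfl
          · exact h
        have hmide := PySem.Int.floordiv_eq_ediv_of_pos (a := a + b) (b := 2) (by norm_num)
        have hm1 : a + 1 ≤ PySem.Int.floordiv (a + b) 2 := by rw [hmide]; omega
        have hm2 : PySem.Int.floordiv (a + b) 2 ≤ b - 1 := by rw [hmide]; omega
        set mid := PySem.Int.floordiv (a + b) 2 with hmid
        have hsplit := slice_split data a mid b ha (by omega) (by omega)
        have hp' := hsplit ▸ hp
        have hp1 := coh_append_left f k _ _ hp'
        have hp2 := coh_append_right f k _ _ hp'
        have hs1ne := slice_ne_nil data a mid ha (by omega) (by omega)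
        have hs2ne := slice_ne_nil data mid b (by omega) (by omega) hb
        have ihl := ih (mid - a).toNat (by omega) a mid rfl ha (by omega) (by omega) hp1
        have ihr := ih (b - mid).toNat (by omega) mid b rfl (by omega) (by omega) hb hp2
        rw [ihl, ihr]
        have hrlne : pvRuns f k (PySem.List.slice data (some a) (some mid)) ≠ [] := by
          rw [Ne, pvRuns_eq_nil_iff]; exact hs1ne
        have hrrne : pvRuns f k (PySem.List.slice data (some mid) (some b)) ≠ [] := by
          rw [Ne, pvRuns_eq_nil_iff]; exact hs2ne
        rw [if_pos ⟨hrlne, hrrne⟩]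
        rw [PySem.List.pyGetD_neg_one _ _ hrlne, getLast_eq_getLastD' _ hrlne,
            PySem.List.pyGetD_zero, getD_zero_eq_headD,
            PySem.List.pyGetD_zero, getD_zero_eq_headD,
            PySem.List.pyGetD_zero, getD_zero_eq_headD]
        rw [pvRuns_last_bin f k _ _ rfl hs1ne]
        obtain ⟨c2, t2, hcs2⟩ : ∃ c2 t2,
            PySem.List.slice data (some mid) (some b) = c2 :: t2 := by
          cases h : PySem.List.slice data (some mid) (some b) with
          | nil => exact absurd h hs2ne
          | cons c2 t2 => exact ⟨c2, t2, rfl⟩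
        have hhh : ((pvRuns f k (PySem.List.slice data (some mid) (some b))).headD []).headD []
            = (PySem.List.slice data (some mid) (some b)).headD [] := by
          rw [hcs2, pvRuns_head_head]; rfl
        rw [hhh]
        rw [hsplit, pvRuns_append f k _ hs2ne _ _ rfl hs1ne]
        rw [PySem.List.slice_to_neg_one, PySem.List.slice_from_one]
        split_ifs with hcond
        · simp
        · rfl
    · rw [dif_neg hij]
      rw [slice_empty_of_le data a b (by omega) (by omega), pvRuns_nil]

-- ===== VERDICT (by name: the statement is the Claim_ definition above) =====
-- the consecutive-run decomposition has at least two groups when the end bins differ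
theorem runs_two_of_ends_ne (f k : Int) (c : List Int) (cs : List (List Int))
    (hk : pvBin f k ((c :: cs).getLastD []) ≠ pvBin f k c) :
    2 ≤ (pvRuns f k (c :: cs)).length := by
  rw [pvRuns_cons]
  by_cases hd : cs.dropWhile (fun x => pvBin f k x == pvBin f k c) = []
  · exfalso
    have hall := List.dropWhile_eq_nil_iff.mp hd
    apply hk
    cases cs with
    | nil => rfl
    | cons b u =>
      have hm := hall _ (List.mem_of_getLast? rfl)
      simp only [beq_iff_eq] at hm
      rw [List.getLastD_cons, getLastD_irrel (b :: u) (by simp) c []]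
      exact hm
  · have : pvRuns f k (cs.dropWhile (fun x => pvBin f k x == pvBin f k c)) ≠ [] := by
      rw [Ne, pvRuns_eq_nil_iff]; exact hd
    cases h : pvRuns f k (cs.dropWhile (fun x => pvBin f k x == pvBin f k c)) with
    | nil => exact absurd h this
    | cons y ys => simp [h]

theorem data_bin_spec : Claim_equal_data_bin := by
  unfold Claim_equal_data_bin
  intro data factor key i j fillgap _ hpre
  obtain ⟨hlt, hge⟩ := hpre
  unfold Spec_data_bin
  unfold data_bin data_bin_alt
  set jv := j.getD (data.length : Int) with hjvdef
  simp only []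
  by_cases hij : i < jv
  · obtain ⟨hf, hi, hjl, hkey, hsort⟩ := hlt hij
    have hne := slice_ne_nil data i jv hi hij hjl
    have hhead := slice_headD data i jv hi hij hjl
    have hlastd := slice_getLastD data i jv hi hij hjl
    obtain ⟨c, cs, hcs⟩ : ∃ c cs,
        PySem.List.slice data (some i) (some jv) = c :: cs := by
      cases h : PySem.List.slice data (some i) (some jv) with
      | nil => exact absurd h hne
      | cons c cs => exact ⟨c, cs, rfl⟩
    rw [if_pos hij]
    by_cases hk : pvBin factor key (PySem.List.pyGetD data i []) =
        pvBin factor key (PySem.List.pyGetD data (jv - 1) [])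
    · rw [if_pos hk]
      have hruns : pvRuns factor key (PySem.List.slice data (some i) (some jv)) =
          [PySem.List.slice data (some i) (some jv)] := by
        rw [hcs]
        rw [pvRuns_single]
        have hle : pvBin factor key ((c :: cs).getLastD []) = pvBin factor key c := by
          have h1 : (c :: cs).getLastD ([] : List Int) =
              PySem.List.pyGetD data (jv - 1) [] := by rw [← hcs, hlastd]
          have h2 : (c :: cs).headD ([] : List Int) = PySem.List.pyGetD data i [] := by
            rw [← hcs, hhead]
          rw [h1, ← hk, ← h2]
          rfl
        exact coh_all_eq factor key c cs (hcs ▸ hsort) hle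
      rw [hruns]
      simp
    · rw [if_neg hk]
      -- the merge expression is data_bin_go unfolded once
      have hgo := go_eq data factor key ((jv - i).toNat) i jv rfl hi (le_of_lt hij) hjl hsort
      rw [data_bin_go, dif_pos hij, dif_neg hk] at hgo
      simp only [] at hgo
      simp only [hgo]
      -- at least two groups, so both sides fill exactly when fillgap is set
      have hk2 : pvBin factor key ((c :: cs).getLastD []) ≠ pvBin factor key c := by
        intro h
        apply hk
        calc pvBin factor key (PySem.List.pyGetD data i [])
            = pvBin factor key ((c :: cs).headD []) := by rw [← hcs, hhead]
          _ = pvBin factor key c := rfl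
          _ = pvBin factor key ((c :: cs).getLastD []) := h.symm
          _ = pvBin factor key (PySem.List.pyGetD data (jv - 1) []) := by rw [← hcs, hlastd]
      have hlen2 : 2 ≤ (pvRuns factor key (PySem.List.slice data (some i) (some jv))).length := by
        rw [hcs]; exact runs_two_of_ends_ne factor key c cs hk2
      have hgne : pvRuns factor key (PySem.List.slice data (some i) (some jv)) ≠ [] := by
        rw [Ne, pvRuns_eq_nil_iff]; exact hne
      cases fillgap with
      | false => simp
      | true =>
        rw [if_pos ⟨rfl, hgne⟩, if_pos (by simp; omega)]
        -- both fills are the same fold over the groups after the first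
        rw [PySem.List.foldl_pyRange_pyGetD' (pvRuns factor key (PySem.List.slice data (some i) (some jv))) []
            (fun (s : List (List (List Int)) × Int) g =>
              (s.1 ++ List.replicate (pvBin factor key (PySem.List.pyGetD g 0 []) - s.2 - 1).toNat []
                   ++ [g],
               pvBin factor key (PySem.List.pyGetD g 0 [])))
            _ (by norm_num)]
        obtain ⟨g0, gs, hg⟩ : ∃ g0 gs,
            pvRuns factor key (PySem.List.slice data (some i) (some jv)) = g0 :: gs := by
          cases h : pvRuns factor key (PySem.List.slice data (some i) (some jv)) with
          | nil => exact absurd h hgne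
          | cons g0 gs => exact ⟨g0, gs, rfl⟩
        rw [hg]
        have hg0 : PySem.List.pyGetD (g0 :: gs) 0 ([] : List (List Int)) = g0 := by
          rw [PySem.List.pyGetD_zero]; rfl
        have hki : pvBin factor key (PySem.List.pyGetD data i []) =
            pvBin factor key (PySem.List.pyGetD g0 0 []) := by
          have : g0 = (pvRuns factor key (c :: cs)).headD [] := by
            rw [← hcs, hg]; rfl
          rw [pvRuns_cons] at this
          rw [this]
          simp only [List.headD_cons]
          rw [PySem.List.pyGetD_zero, (by rfl :
              (c :: cs.takeWhile (fun x => pvBin factor key x == pvBin factor key c)).getD 0 ([] : List Int) = c)]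
          rw [← hhead, hcs]
          rfl
        rw [hg0, hki]
        simp [pvFill]
  · rw [if_neg hij]
    rw [hge hij, pvRuns_nil]
    simp [pvFill]
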